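-- pv_equiv track=rewrite | github.com/aaronwppe/bp-pre-internship | python/212.py | sum_of_4th_power
-- ===== SOURCE A (Python) =====
-- def sum_of_4th_power(limit: int) -> int | None:
--     if limit < 0:
--         return None
--
--     if limit <= 1:
--         return limit
--
--     sum = 1
--
--     for i in range(2, limit + 1):
--         sum += i ** 4
--
--     return sum
-- ===== SOURCE B (Python) =====
-- def sum_of_4th_power(limit: int) -> int | None:
--     if limit < 0:
--         return None
--     return limit * (limit + 1) * (2 * limit + 1) * (3 * limit * limit + 3 * limit - 1) // 30
-- ===== Notes on version B (the rewrite author's own statement) =====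
-- stated objective: faster
-- what changed: Replaced the O(n) summation loop over range(2, limit+1) by the closed-form polynomial n(n+1)(2n+1)(3n^2+3n-1)//30.
import Mathlib
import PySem

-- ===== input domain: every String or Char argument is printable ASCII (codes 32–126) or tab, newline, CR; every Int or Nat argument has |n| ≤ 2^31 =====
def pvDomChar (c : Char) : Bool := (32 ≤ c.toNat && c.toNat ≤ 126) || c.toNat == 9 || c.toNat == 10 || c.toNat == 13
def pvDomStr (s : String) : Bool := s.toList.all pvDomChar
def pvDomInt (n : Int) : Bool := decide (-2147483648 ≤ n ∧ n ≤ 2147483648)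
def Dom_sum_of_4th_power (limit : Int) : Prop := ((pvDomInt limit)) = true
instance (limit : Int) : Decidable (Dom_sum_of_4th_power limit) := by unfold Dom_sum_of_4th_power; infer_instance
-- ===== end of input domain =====

-- B replaces A's O(n) summation loop by the closed-form polynomial n(n+1)(2n+1)(3n²+3n−1)//30 (objective: faster).

-- ===== PORT A =====
def sum_of_4th_power (limit : Int) : Option Int :=
  if limit < 0 then none
  else if limit ≤ 1 then some limit
  else some ((PySem.List.pyRange 2 (limit + 1) 1).foldl (fun s i => s + i ^ 4) 1)

-- ===== PORT B =====
def sum_of_4th_power_alt (limit : Int) : Option Int :=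
  if limit < 0 then none
  else some (PySem.Int.floordiv (limit * (limit + 1) * (2 * limit + 1) * (3 * limit * limit + 3 * limit - 1)) 30)

-- ===== PRECONDITION & SPEC =====
def Spec_sum_of_4th_power (limit : Int) (out : Option Int) : Prop := out = sum_of_4th_power_alt limit
instance (limit : Int) (out : Option Int) : Decidable (Spec_sum_of_4th_power limit out) := by unfold Spec_sum_of_4th_power; infer_instance

-- ===== CLAIM (what is proved, stated in full; the proofs are below) =====
def Claim_equal_sum_of_4th_power : Prop := ∀ (limit : Int), Dom_sum_of_4th_power limit → Spec_sum_of_4th_power limit (sum_of_4th_power limit)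

-- ===== LEMMAS AND PROOFS =====

-- The loop's value, times 30, equals the polynomial; indexed so that limit = n + 1 ≥ 1.
theorem pv_loop_closed (n : Nat) :
    (PySem.List.pyRange 2 ((n : Int) + 1 + 1) 1).foldl (fun s i => s + i ^ 4) 1 * 30 =
      ((n : Int) + 1) * ((n : Int) + 1 + 1) * (2 * ((n : Int) + 1) + 1) *
        (3 * ((n : Int) + 1) * ((n : Int) + 1) + 3 * ((n : Int) + 1) - 1) := by
  induction n with
  | zero => decide
  | succ m ih =>
      have h : PySem.List.pyRange 2 ((m : Int) + 1 + 1 + 1) 1 =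
          PySem.List.pyRange 2 ((m : Int) + 1 + 1) 1 ++ [(m : Int) + 1 + 1] := by
        have := PySem.List.pyRange_one_succ_right (a := 2) (b := (m : Int) + 1 + 1) (by omega)
        simpa using this
      push_cast
      have h' : ((m : Int) + 1 + 1 + 1) = ((m : Int) + 1) + 1 + 1 := by ring
      rw [show ((m : Int) + 1 + 1) = ((m : Int) + 1 + 1) from rfl]
      calc (PySem.List.pyRange 2 ((m : Int) + 1 + 1 + 1) 1).foldl (fun s i => s + i ^ 4) 1 * 30
          = ((PySem.List.pyRange 2 ((m : Int) + 1 + 1) 1).foldl (fun s i => s + i ^ 4) 1 + ((m : Int) + 1 + 1) ^ 4) * 30 := by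
            rw [h]; simp [List.foldl_append]
        _ = _ := by linear_combination ih

theorem pv_floordiv_mul30 (s : Int) : PySem.Int.floordiv (s * 30) 30 = s := by
  rw [PySem.Int.floordiv_eq_ediv_of_pos (by omega)]
  exact Int.mul_ediv_cancel s (by omega)

-- ===== VERDICT (by name: the statement is the Claim_ definition above) =====
set_option maxRecDepth 8000 in
theorem sum_of_4th_power_spec : Claim_equal_sum_of_4th_power := by
  intro limit _
  unfold Spec_sum_of_4th_power sum_of_4th_power sum_of_4th_power_alt
  by_cases hneg : limit < 0
  · simp [hneg]
  · simp only [hneg, if_false]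
    by_cases h1 : limit ≤ 1
    · have h : limit = 0 ∨ limit = 1 := by omega
      rcases h with rfl | rfl
      · have h30 := pv_floordiv_mul30 0
        norm_num at h30
        norm_num [h30]
      · have h30 := pv_floordiv_mul30 1
        norm_num at h30
        norm_num [h30]
    · simp only [h1, if_false]
      obtain ⟨n, hn⟩ : ∃ n : Nat, limit = (n : Int) + 1 := ⟨(limit - 1).toNat, by omega⟩
      subst hn
      rw [← pv_loop_closed n, pv_floordiv_mul30]
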